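-- pv_equiv track=rewrite | github.com/ickc/pandoc-ucb-letterhead-template | util/generate_pandoc_template.py | make_ucb_letterhead_template
-- ===== SOURCE A (Python) =====
-- def make_ucb_letterhead_template(pandoc_template: list[str]) -> list[str]:
--     r"""
--     Modify the Pandoc template content by inserting specific lines and
--     commenting out or removing certain lines based on the given requirements.
--
--     - Inserts UCB-letterhead setup before $for(header-includes)$.
--     - Inserts UCB-letterhead letter start before $for(include-before)$.
--     - Inserts \end{letter} after the first $endfor$ following $for(include-after)$.
--     - Comments out lines starting with \setkeys{Gin}.
--     - Comments out the \maketitle line.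
--     - Removes $if(graphics)$ and the first $endif$ after it, keeping everything in between intact.
--     """
--     header_includes_insertion = """
-- \\usepackage[a-1b]{pdfx}
-- % begin UCB-letterhead
-- \\usepackage{fancyhdr} % for fancy headers
-- \\usepackage{lastpage}
-- \\pagestyle{fancy}
-- \\renewcommand{\\headrulewidth}{0pt}
-- \\fancyhead{} % footer for pages 2 on
-- \\fancyhfoffset[R]{0pt}
-- $if(ucb-letterhead.lfoot)$\\lfoot{\\footnotesize {\\textit{$ucb-letterhead.lfoot$}}}$endif$ % Left footer
-- \\cfoot{$if(ucb-letterhead.cfoot)$\\footnotesize {\\textit{$ucb-letterhead.cfoot$}}$endif$} % Change for center footer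
-- \\rfoot{\\footnotesize Page \\thepage\\ of \\pageref{LastPage}} % Right footer page #s
-- \\renewcommand{\\footrulewidth}{0pt}
-- %first page margins are different to accommodate the letterhead
-- \\topmargin=-1.1in % Moves the top margin; here it is a negative value to move the text up
-- \\textheight=9.5in % Total text height for this page
-- \\oddsidemargin=-10pt % Left margin; widened here with a negative value
-- \\textwidth=7in % Text width
-- \\let\\raggedleft\\raggedright % Makes the date appear on the left
-- % end UCB-letterhead
-- """.strip()
--
--     include_before_insertion = """
-- % begin UCB-letterhead
-- \\begin{letter}{$if(ucb-letterhead.recipient)$$ucb-letterhead.recipient$$endif$} %put the recipient information here and maybe a reference line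
--
-- \\begin{center}
--
-- \\begin{picture}(1000,1)
--   \\put(1,-2){\\includegraphics[scale=0.38]{UCBerkeley_wordmark_blue.pdf}}
--   \\put(439,-20){\\includegraphics[scale=0.125]{ucberkeleyseal_139_540.pdf}}
--   $if(author)$\\put(150,33){\\textbf{\\footnotesize $for(author)$$author$$sep$ \\and $endfor$ }}$endif$
--   $if(ucb-letterhead.title)$\\put(150,22){\\footnotesize $ucb-letterhead.title$ }$endif$
--   $if(ucb-letterhead.department)$\\put(150,11){\\footnotesize $ucb-letterhead.department$ }$endif$
--   $if(ucb-letterhead.address)$\\put(280,33){\\footnotesize $ucb-letterhead.address$ }$endif$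
--   $if(ucb-letterhead.address2)$\\put(280,22){\\footnotesize $ucb-letterhead.address2$ }$endif$
--   $if(ucb-letterhead.phone)$\\put(280,11){\\footnotesize Phone: $ucb-letterhead.phone$ } $endif$
--   $if(ucb-letterhead.mobile)$\\put(280,0){\\footnotesize Mobile: $ucb-letterhead.mobile$ }$endif$ % Comment this out to omit your mobile
--   $if(ucb-letterhead.email)$\\put(280,-11){\\footnotesize E-mail: $ucb-letterhead.email$ }$endif$
--   $if(ucb-letterhead.url)$\\put(280,-22){\\footnotesize $ucb-letterhead.url$ }$endif$
--   \\put(0,-28){\\rule{\\textwidth}{0.4pt}}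
-- \\end{picture}
-- \\end{center}
-- \\vspace{10mm}
-- % end UCB-letterhead
-- """.strip()
--
--     include_after_insertion = "\\end{letter}"
--
--     output_lines = []
--
--     inside_graphics_block = False
--
--     for line in pandoc_template:
--         if line.strip() == "$for(header-includes)$":
--             output_lines.append(header_includes_insertion)
--
--         if line.strip() == "$for(include-before)$":
--             output_lines.append(include_before_insertion)
--
--         if line.strip() == "$if(graphics)$":
--             inside_graphics_block = True
--             continue
--
--         if inside_graphics_block and line.strip() == "$endif$":
--             inside_graphics_block = False
--             continue
--
--         if line.strip() == "\\maketitle":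
--             output_lines.append("% " + line)
--             continue
--
--         if line.strip().startswith("\\setkeys{Gin}"):
--             output_lines.append("% " + line)
--             continue
--
--         output_lines.append(line)
--
--     # Handle insertion after $for(include-after)$ and the first occurrence of $endfor$
--     for i, line in enumerate(output_lines):
--         if line.strip() == "$for(include-after)$":
--             for j in range(i + 1, len(output_lines)):
--                 if output_lines[j].strip() == "$endfor$":
--                     output_lines.insert(j + 1, include_after_insertion)
--                     break
--             break
--
--     return output_lines
-- ===== SOURCE B (Python) =====
-- def make_ucb_letterhead_template(pandoc_template: list[str]) -> list[str]:
--     """Single-pass re-implementation: a small emit-state-machine inserts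
--     \\end{letter} after the first $endfor$ following the first
--     $for(include-after)$, eliminating A's second scan-and-insert pass."""
--     header_includes_insertion = """
-- \\usepackage[a-1b]{pdfx}
-- % begin UCB-letterhead
-- \\usepackage{fancyhdr} % for fancy headers
-- \\usepackage{lastpage}
-- \\pagestyle{fancy}
-- \\renewcommand{\\headrulewidth}{0pt}
-- \\fancyhead{} % footer for pages 2 on
-- \\fancyhfoffset[R]{0pt}
-- $if(ucb-letterhead.lfoot)$\\lfoot{\\footnotesize {\\textit{$ucb-letterhead.lfoot$}}}$endif$ % Left footer
-- \\cfoot{$if(ucb-letterhead.cfoot)$\\footnotesize {\\textit{$ucb-letterhead.cfoot$}}$endif$} % Change for center footer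
-- \\rfoot{\\footnotesize Page \\thepage\\ of \\pageref{LastPage}} % Right footer page #s
-- \\renewcommand{\\footrulewidth}{0pt}
-- %first page margins are different to accommodate the letterhead
-- \\topmargin=-1.1in % Moves the top margin; here it is a negative value to move the text up
-- \\textheight=9.5in % Total text height for this page
-- \\oddsidemargin=-10pt % Left margin; widened here with a negative value
-- \\textwidth=7in % Text width
-- \\let\\raggedleft\\raggedright % Makes the date appear on the left
-- % end UCB-letterhead
-- """.strip()
--
--     include_before_insertion = """
-- % begin UCB-letterhead
-- \\begin{letter}{$if(ucb-letterhead.recipient)$$ucb-letterhead.recipient$$endif$} %put the recipient information here and maybe a reference line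
--
-- \\begin{center}
--
-- \\begin{picture}(1000,1)
--   \\put(1,-2){\\includegraphics[scale=0.38]{UCBerkeley_wordmark_blue.pdf}}
--   \\put(439,-20){\\includegraphics[scale=0.125]{ucberkeleyseal_139_540.pdf}}
--   $if(author)$\\put(150,33){\\textbf{\\footnotesize $for(author)$$author$$sep$ \\and $endfor$ }}$endif$
--   $if(ucb-letterhead.title)$\\put(150,22){\\footnotesize $ucb-letterhead.title$ }$endif$
--   $if(ucb-letterhead.department)$\\put(150,11){\\footnotesize $ucb-letterhead.department$ }$endif$
--   $if(ucb-letterhead.address)$\\put(280,33){\\footnotesize $ucb-letterhead.address$ }$endif$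
--   $if(ucb-letterhead.address2)$\\put(280,22){\\footnotesize $ucb-letterhead.address2$ }$endif$
--   $if(ucb-letterhead.phone)$\\put(280,11){\\footnotesize Phone: $ucb-letterhead.phone$ } $endif$
--   $if(ucb-letterhead.mobile)$\\put(280,0){\\footnotesize Mobile: $ucb-letterhead.mobile$ }$endif$ % Comment this out to omit your mobile
--   $if(ucb-letterhead.email)$\\put(280,-11){\\footnotesize E-mail: $ucb-letterhead.email$ }$endif$
--   $if(ucb-letterhead.url)$\\put(280,-22){\\footnotesize $ucb-letterhead.url$ }$endif$
--   \\put(0,-28){\\rule{\\textwidth}{0.4pt}}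
-- \\end{picture}
-- \\end{center}
-- \\vspace{10mm}
-- % end UCB-letterhead
-- """.strip()
--
--     output_lines = []
--     inside_graphics_block = False
--     phase = 0  # 0 = before $for(include-after)$, 1 = awaiting $endfor$, 2 = done
--
--     def emit(x):
--         nonlocal phase
--         output_lines.append(x)
--         stripped = x.strip()
--         if phase == 1 and stripped == "$endfor$":
--             output_lines.append("\\end{letter}")
--             phase = 2
--         elif phase == 0 and stripped == "$for(include-after)$":
--             phase = 1
--
--     for line in pandoc_template:
--         s = line.strip()
--         if s == "$for(header-includes)$":
--             emit(header_includes_insertion)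
--         if s == "$for(include-before)$":
--             emit(include_before_insertion)
--         if s == "$if(graphics)$":
--             inside_graphics_block = True
--             continue
--         if inside_graphics_block and s == "$endif$":
--             inside_graphics_block = False
--             continue
--         if s == "\\maketitle" or s.startswith("\\setkeys{Gin}"):
--             emit("% " + line)
--         else:
--             emit(line)
--
--     return output_lines
-- ===== Notes on version B (the rewrite author's own statement) =====
-- stated objective: alternative
-- what changed: Replaces A's two passes (transform loop, then an enumerate scan with a nested range scan and list.insert to place \end{letter}) with a single pass whose emit helper runs a 3-state machine (before include-after / awaiting endfor / done) and appends \end{letter} at emit time.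
import Mathlib
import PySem

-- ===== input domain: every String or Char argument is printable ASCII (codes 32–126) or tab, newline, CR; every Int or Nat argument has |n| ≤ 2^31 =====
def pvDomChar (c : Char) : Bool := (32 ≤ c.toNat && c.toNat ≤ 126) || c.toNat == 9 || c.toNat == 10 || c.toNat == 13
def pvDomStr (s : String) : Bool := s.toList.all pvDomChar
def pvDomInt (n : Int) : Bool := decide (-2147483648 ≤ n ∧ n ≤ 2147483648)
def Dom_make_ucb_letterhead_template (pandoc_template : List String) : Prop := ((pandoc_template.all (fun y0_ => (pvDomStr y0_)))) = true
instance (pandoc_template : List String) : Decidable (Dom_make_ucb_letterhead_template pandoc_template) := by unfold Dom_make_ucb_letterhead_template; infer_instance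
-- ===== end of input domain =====

-- ===== PORT A =====
-- B replaces A's second scan-and-insert pass by a one-pass emit state machine; same return value.
def pvHdrIns : String :=
  "\\usepackage[a-1b]{pdfx}\n% begin UCB-letterhead\n\\usepackage{fancyhdr} % for fancy headers\n\\usepackage{lastpage}\n\\pagestyle{fancy}\n\\renewcommand{\\headrulewidth}{0pt}\n\\fancyhead{} % footer for pages 2 on\n\\fancyhfoffset[R]{0pt}\n$if(ucb-letterhead.lfoot)$\\lfoot{\\footnotesize {\\textit{$ucb-letterhead.lfoot$}}}$endif$ % Left footer\n\\cfoot{$if(ucb-letterhead.cfoot)$\\footnotesize {\\textit{$ucb-letterhead.cfoot$}}$endif$} % Change for center footer\n\\rfoot{\\footnotesize Page \\thepage\\ of \\pageref{LastPage}} % Right footer page #s \n\\renewcommand{\\footrulewidth}{0pt}\n%first page margins are different to accommodate the letterhead\n\\topmargin=-1.1in % Moves the top margin; here it is a negative value to move the text up\n\\textheight=9.5in % Total text height for this page\n\\oddsidemargin=-10pt % Left margin; widened here with a negative value\n\\textwidth=7in % Text width\n\\let\\raggedleft\\raggedright % Makes the date appear on the left\n% end UCB-letterhead"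

def pvBeforeIns : String :=
  "% begin UCB-letterhead\n\\begin{letter}{$if(ucb-letterhead.recipient)$$ucb-letterhead.recipient$$endif$} %put the recipient information here and maybe a reference line\n\n\\begin{center}\n\n\\begin{picture}(1000,1)\n  \\put(1,-2){\\includegraphics[scale=0.38]{UCBerkeley_wordmark_blue.pdf}}\n  \\put(439,-20){\\includegraphics[scale=0.125]{ucberkeleyseal_139_540.pdf}}\n  $if(author)$\\put(150,33){\\textbf{\\footnotesize $for(author)$$author$$sep$ \\and $endfor$ }}$endif$\n  $if(ucb-letterhead.title)$\\put(150,22){\\footnotesize $ucb-letterhead.title$ }$endif$\n  $if(ucb-letterhead.department)$\\put(150,11){\\footnotesize $ucb-letterhead.department$ }$endif$\n  $if(ucb-letterhead.address)$\\put(280,33){\\footnotesize $ucb-letterhead.address$ }$endif$\n  $if(ucb-letterhead.address2)$\\put(280,22){\\footnotesize $ucb-letterhead.address2$ }$endif$\n  $if(ucb-letterhead.phone)$\\put(280,11){\\footnotesize Phone: $ucb-letterhead.phone$ } $endif$\n  $if(ucb-letterhead.mobile)$\\put(280,0){\\footnotesize Mobile: $ucb-letterhead.mobile$ }$endif$ %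 Comment this out to omit your mobile\n  $if(ucb-letterhead.email)$\\put(280,-11){\\footnotesize E-mail: $ucb-letterhead.email$ }$endif$\n  $if(ucb-letterhead.url)$\\put(280,-22){\\footnotesize $ucb-letterhead.url$ }$endif$\n  \\put(0,-28){\\rule{\\textwidth}{0.4pt}}\n\\end{picture}\n\\end{center}\n\\vspace{10mm}\n% end UCB-letterhead"

-- A, first pass: the for-loop over pandoc_template (append / comment / remove graphics block)
def pvStepA (acc : List String × Bool) (line : String) : List String × Bool :=
  let out := acc.1
  let g := acc.2
  let out := if PySem.Str.strip line == "$for(header-includes)$" then out ++ [pvHdrIns] else out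
  let out := if PySem.Str.strip line == "$for(include-before)$" then out ++ [pvBeforeIns] else out
  if PySem.Str.strip line == "$if(graphics)$" then (out, true)
  else if g && (PySem.Str.strip line == "$endif$") then (out, false)
  else if PySem.Str.strip line == "\\maketitle" then (out ++ ["% " ++ line], g)
  else if PySem.Str.startswith (PySem.Str.strip line) "\\setkeys{Gin}" then (out ++ ["% " ++ line], g)
  else (out ++ [line], g)

-- A, second pass, inner loop: 'for j in range(i+1, len(out))' searching '$endfor$', then insert(j+1, …)
def pvInnerA (out : List String) (j : Nat) : List String :=
  if h : j < out.length then
    if PySem.Str.strip out[j] == "$endfor$" then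
      PySem.List.insert out ((j : Int) + 1) "\\end{letter}"
    else pvInnerA out (j + 1)
  else out
termination_by out.length - j

-- A, second pass, outer loop: 'for i, line in enumerate(out)' searching '$for(include-after)$'
def pvOuterA (out : List String) (i : Nat) : List String :=
  if h : i < out.length then
    if PySem.Str.strip out[i] == "$for(include-after)$" then pvInnerA out (i + 1)
    else pvOuterA out (i + 1)
  else out
termination_by out.length - i

def make_ucb_letterhead_template (pandoc_template : List String) : List String :=
  let p := pandoc_template.foldl pvStepA ([], false)
  pvOuterA p.1 0

-- ===== PORT B =====
-- Source B's emit: append x; in phase 1 an '$endfor$' line triggers the insertion (phase 2 = done);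
-- in phase 0 a '$for(include-after)$' line arms phase 1.
def pvEmitB (st : List String × Nat) (x : String) : List String × Nat :=
  let out := st.1 ++ [x]
  let s := PySem.Str.strip x
  if st.2 == 1 && (s == "$endfor$") then (out ++ ["\\end{letter}"], 2)
  else if st.2 == 0 && (s == "$for(include-after)$") then (out, 1)
  else (out, st.2)

def pvStepB (acc : List String × Bool × Nat) (line : String) : List String × Bool × Nat :=
  let out := acc.1
  let g := acc.2.1
  let ph := acc.2.2
  let s := PySem.Str.strip line
  let op := if s == "$for(header-includes)$" then pvEmitB (out, ph) pvHdrIns else (out, ph)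
  let op := if s == "$for(include-before)$" then pvEmitB op pvBeforeIns else op
  if s == "$if(graphics)$" then (op.1, true, op.2)
  else if g && (s == "$endif$") then (op.1, false, op.2)
  else if s == "\\maketitle" || PySem.Str.startswith s "\\setkeys{Gin}" then
    let op := pvEmitB op ("% " ++ line)
    (op.1, g, op.2)
  else
    let op := pvEmitB op line
    (op.1, g, op.2)

def make_ucb_letterhead_template_alt (pandoc_template : List String) : List String :=
  (pandoc_template.foldl pvStepB ([], false, 0)).1

-- ===== PRECONDITION & SPEC =====
def Spec_make_ucb_letterhead_template (pandoc_template : List String) (out : List String) : Prop := out = make_ucb_letterhead_template_alt pandoc_template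
instance (pandoc_template : List String) (out : List String) : Decidable (Spec_make_ucb_letterhead_template pandoc_template out) := by unfold Spec_make_ucb_letterhead_template; infer_instance

-- ===== CLAIM (what is proved, stated in full; the proofs are below) =====
def Claim_equal_make_ucb_letterhead_template : Prop := ∀ (pandoc_template : List String), Dom_make_ucb_letterhead_template pandoc_template → Spec_make_ucb_letterhead_template pandoc_template (make_ucb_letterhead_template pandoc_template)


-- ===== LEMMAS AND PROOFS =====

-- Structural form of A's second pass: insert "\end{letter}" after the first
-- '$endfor$' that follows the first '$for(include-after)$'.
def pvGo2 : List String → List String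
  | [] => []
  | x :: xs =>
    if PySem.Str.strip x == "$endfor$" then x :: "\\end{letter}" :: xs else x :: pvGo2 xs

def pvGo1 : List String → List String
  | [] => []
  | x :: xs =>
    if PySem.Str.strip x == "$for(include-after)$" then x :: pvGo2 xs else x :: pvGo1 xs

-- What A's first pass appends for one line, and the graphics-flag transition.
def pvChunk (g : Bool) (line : String) : List String :=
  (if PySem.Str.strip line == "$for(header-includes)$" then [pvHdrIns] else []) ++
  (if PySem.Str.strip line == "$for(include-before)$" then [pvBeforeIns] else []) ++
  (if PySem.Str.strip line == "$if(graphics)$" then []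
   else if g && (PySem.Str.strip line == "$endif$") then []
   else if PySem.Str.strip line == "\\maketitle" || PySem.Str.startswith (PySem.Str.strip line) "\\setkeys{Gin}" then ["% " ++ line]
   else [line])

def pvGNext (g : Bool) (line : String) : Bool :=
  if PySem.Str.strip line == "$if(graphics)$" then true
  else if g && (PySem.Str.strip line == "$endif$") then false
  else g

def pvChunks : List String → Bool → List String
  | [], _ => []
  | l :: ls, g => pvChunk g l ++ pvChunks ls (pvGNext g l)

def pvGFold : List String → Bool → Bool
  | [], g => g
  | l :: ls, g => pvGFold ls (pvGNext g l)

theorem pvStepA_eq (out : List String) (g : Bool) (line : String) :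
    pvStepA (out, g) line = (out ++ pvChunk g line, pvGNext g line) := by
  simp only [pvStepA, pvChunk, pvGNext]
  generalize PySem.Str.strip line = s
  split_ifs <;> simp_all

theorem pvFoldA (t : List String) : ∀ (out : List String) (g : Bool),
    t.foldl pvStepA (out, g) = (out ++ pvChunks t g, pvGFold t g) := by
  induction t with
  | nil => intro out g; simp [pvChunks, pvGFold]
  | cons l ls ih =>
    intro out g
    simp only [List.foldl_cons, pvStepA_eq, pvChunks, pvGFold, ih, List.append_assoc]

theorem pvTakeCons {α : Type} (l : List α) (j : Nat) (h : j < l.length) (X : List α) :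
    l.take (j + 1) ++ X = l.take j ++ l[j] :: X := by
  rw [List.take_succ_eq_append_getElem h, List.append_assoc, List.singleton_append]

-- A's index loops compute the structural insertions.
theorem pvInnerA_eq (out : List String) (j : Nat) :
    pvInnerA out j = out.take j ++ pvGo2 (out.drop j) := by
  fun_induction pvInnerA out j with
  | case1 j h hmatch =>
    have h1 : (j : Int) + 1 = ((j + 1 : Nat) : Int) := by push_cast; ring
    rw [h1, PySem.List.insert_natCast out (j + 1) _ (by omega),
      ← List.getElem_cons_drop h, pvGo2]
    simp only [hmatch, if_pos]
    exact pvTakeCons out j h _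
  | case2 j h hmatch ih =>
    rw [ih, ← List.getElem_cons_drop h, pvGo2]
    simp only [hmatch, if_neg, Bool.not_eq_true]
    exact pvTakeCons out j h _
  | case3 j h =>
    rw [List.take_of_length_le (by omega), List.drop_eq_nil_of_le (by omega)]
    simp [pvGo2]

theorem pvOuterA_eq (out : List String) (i : Nat) :
    pvOuterA out i = out.take i ++ pvGo1 (out.drop i) := by
  fun_induction pvOuterA out i with
  | case1 i h hmatch =>
    rw [pvInnerA_eq, ← List.getElem_cons_drop h, pvGo1]
    simp only [hmatch, if_pos]
    exact pvTakeCons out i h _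
  | case2 i h hmatch ih =>
    rw [ih, ← List.getElem_cons_drop h, pvGo1]
    simp only [hmatch, if_neg, Bool.not_eq_true]
    exact pvTakeCons out i h _
  | case3 i h =>
    rw [List.take_of_length_le (by omega), List.drop_eq_nil_of_le (by omega)]
    simp [pvGo1]

-- B's emit state machine, factored per emitted string.
def pvEmitOut (ph : Nat) (x : String) : List String :=
  if ph == 1 && (PySem.Str.strip x == "$endfor$") then [x, "\\end{letter}"] else [x]

def pvPhNext (ph : Nat) (x : String) : Nat :=
  if ph == 1 && (PySem.Str.strip x == "$endfor$") then 2
  else if ph == 0 && (PySem.Str.strip x == "$for(include-after)$") then 1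
  else ph

def pvRun : List String → Nat → List String
  | [], _ => []
  | x :: xs, ph => pvEmitOut ph x ++ pvRun xs (pvPhNext ph x)

def pvPhRun : List String → Nat → Nat
  | [], ph => ph
  | x :: xs, ph => pvPhRun xs (pvPhNext ph x)

theorem pvEmitB_eq (out : List String) (ph : Nat) (x : String) :
    pvEmitB (out, ph) x = (out ++ pvEmitOut ph x, pvPhNext ph x) := by
  simp only [pvEmitB, pvEmitOut, pvPhNext]
  split_ifs <;> simp

theorem pvRun_append (xs ys : List String) : ∀ ph,
    pvRun (xs ++ ys) ph = pvRun xs ph ++ pvRun ys (pvPhRun xs ph) := by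
  induction xs with
  | nil => intro ph; simp [pvRun, pvPhRun]
  | cons x xs ih => intro ph; simp [pvRun, pvPhRun, ih]

theorem pvPhRun_append (xs ys : List String) : ∀ ph,
    pvPhRun (xs ++ ys) ph = pvPhRun ys (pvPhRun xs ph) := by
  induction xs with
  | nil => intro ph; simp [pvPhRun]
  | cons x xs ih => intro ph; simp [pvPhRun, ih]

theorem pvStepB_eq (out : List String) (g : Bool) (ph : Nat) (line : String) :
    pvStepB (out, g, ph) line =
      (out ++ pvRun (pvChunk g line) ph, pvGNext g line, pvPhRun (pvChunk g line) ph) := by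
  simp only [pvStepB, pvChunk, pvGNext]
  generalize PySem.Str.strip line = s
  split_ifs <;>
    simp_all [pvEmitB_eq, pvRun, pvPhRun, List.append_assoc]

theorem pvFoldB (t : List String) : ∀ (out : List String) (g : Bool) (ph : Nat),
    t.foldl pvStepB (out, g, ph) =
      (out ++ pvRun (pvChunks t g) ph, pvGFold t g, pvPhRun (pvChunks t g) ph) := by
  induction t with
  | nil => intro out g ph; simp [pvChunks, pvGFold, pvRun, pvPhRun]
  | cons l ls ih =>
    intro out g ph
    simp only [List.foldl_cons, pvStepB_eq, ih, pvChunks, pvGFold,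
      pvRun_append, pvPhRun_append, List.append_assoc]

-- The state machine run from each phase is the corresponding structural pass.
theorem pvRun_two (xs : List String) : pvRun xs 2 = xs := by
  induction xs with
  | nil => rfl
  | cons x xs ih => simp [pvRun, pvEmitOut, pvPhNext, ih]

theorem pvRun_one (xs : List String) : pvRun xs 1 = pvGo2 xs := by
  induction xs with
  | nil => rfl
  | cons x xs ih =>
    by_cases h : PySem.Str.strip x == "$endfor$" <;>
      simp [pvRun, pvEmitOut, pvPhNext, pvGo2, h, ih, pvRun_two]

theorem pvRun_zero (xs : List String) : pvRun xs 0 = pvGo1 xs := by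
  induction xs with
  | nil => rfl
  | cons x xs ih =>
    by_cases h : PySem.Str.strip x == "$for(include-after)$" <;>
      simp [pvRun, pvEmitOut, pvPhNext, pvGo1, h, ih, pvRun_one]

-- ===== VERDICT (by name: the statement is the Claim_ definition above) =====
theorem make_ucb_letterhead_template_spec : Claim_equal_make_ucb_letterhead_template := by
  intro t _
  unfold Spec_make_ucb_letterhead_template
  unfold make_ucb_letterhead_template make_ucb_letterhead_template_alt
  rw [pvFoldA, pvFoldB]
  simp only [pvOuterA_eq, List.take_zero, List.drop_zero, List.nil_append, pvRun_zero]
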